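-- pv_equiv track=rewrite | github.com/JaiRaga/Codeforces-problemset | coolness.py | coolness
-- ===== SOURCE A (Python) =====
-- def coolness(arr):
--   l = 0
--   h = 0
--   total = 0
--   for i in range(len(arr)):
--     if i == 0:
--       l = arr[i]
--       h = arr[i]
--     else:
--       if arr[i] < l:
--         l = arr[i]
--         total += 1
--       elif arr[i] > h:
--         h = arr[i]
--         total += 1
--   return total
-- ===== SOURCE B (Python) =====
-- def coolness(arr):
--   if not arr:
--     return 0
--   total = 0
--   lo = arr[0]
--   for x in arr[1:]:
--     if x < lo:
--       lo = x
--       total += 1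
--   hi = arr[0]
--   for x in arr[1:]:
--     if x > hi:
--       hi = x
--       total += 1
--   return total
-- ===== Notes on version B (the rewrite author's own statement) =====
-- stated objective: alternative
-- what changed: Replaces A's single index-based sweep carrying both running min and max in one if/elif with two independent value-based sweeps over arr[1:], one counting new minima, one counting new maxima, summing the counts (valid since min<=max makes A's two events disjoint).
import Mathlib
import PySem

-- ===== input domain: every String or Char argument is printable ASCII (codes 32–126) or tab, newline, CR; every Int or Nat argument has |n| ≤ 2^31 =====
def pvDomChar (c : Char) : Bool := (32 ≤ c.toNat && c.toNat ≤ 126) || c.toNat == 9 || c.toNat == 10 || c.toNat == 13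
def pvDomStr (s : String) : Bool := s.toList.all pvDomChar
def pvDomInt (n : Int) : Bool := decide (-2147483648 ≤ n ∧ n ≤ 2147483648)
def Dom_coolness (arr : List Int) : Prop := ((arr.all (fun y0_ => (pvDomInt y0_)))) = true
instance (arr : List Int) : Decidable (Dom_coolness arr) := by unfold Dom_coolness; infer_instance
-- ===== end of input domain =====

-- B replaces A's single min-and-max sweep by two independent record-counting sweeps; alternative decomposition, same cost.

-- ===== PORT A =====
-- A's loop over range(len(arr)) with state (l, h, total); the i == 0 branch initialises l and h.
def coolnessStepA (arr : List Int) (s : Int × Int × Int) (i : Int) : Int × Int × Int :=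
  if i == 0 then (PySem.List.pyGetD arr i 0, PySem.List.pyGetD arr i 0, s.2.2)
  else
    let x := PySem.List.pyGetD arr i 0
    if x < s.1 then (x, s.2.1, s.2.2 + 1)
    else if x > s.2.1 then (s.1, x, s.2.2 + 1)
    else s

def coolness (arr : List Int) : Int :=
  ((PySem.List.pyRange 0 (PySem.List.len arr) 1).foldl (coolnessStepA arr) (0, 0, 0)).2.2

-- ===== PORT B =====
-- first sweep: running minimum lo with count; second sweep: running maximum hi with count
def minStep (p : Int × Int) (x : Int) : Int × Int := if x < p.1 then (x, p.2 + 1) else p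
def maxStep (p : Int × Int) (x : Int) : Int × Int := if x > p.1 then (x, p.2 + 1) else p

def coolness_alt (arr : List Int) : Int :=
  match arr with
  | [] => 0
  | a :: rest =>
    let t1 := (rest.foldl minStep (a, 0)).2
    (rest.foldl maxStep (a, t1)).2

-- ===== PRECONDITION & SPEC =====
def Spec_coolness (arr : List Int) (out : Int) : Prop := out = coolness_alt arr
instance (arr : List Int) (out : Int) : Decidable (Spec_coolness arr out) := by unfold Spec_coolness; infer_instance

-- ===== CLAIM =====
def Claim_equal_coolness : Prop := ∀ (arr : List Int), Dom_coolness arr → Spec_coolness arr (coolness arr)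

-- ===== LEMMAS AND PROOFS =====

-- the count component of a sweep is an offset: starting count c just adds c
theorem minStep_offset (xs : List Int) (m c : Int) :
    xs.foldl minStep (m, c) = ((xs.foldl minStep (m, 0)).1, c + (xs.foldl minStep (m, 0)).2) := by
  induction xs generalizing m c with
  | nil => simp
  | cons x xs ih =>
    simp only [List.foldl_cons, minStep]
    split
    · rw [ih x (c + 1), ih x (0 + 1)]; simp [Prod.ext_iff]; ring
    · exact ih m c

theorem maxStep_offset (xs : List Int) (m c : Int) :
    xs.foldl maxStep (m, c) = ((xs.foldl maxStep (m, 0)).1, c + (xs.foldl maxStep (m, 0)).2) := by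
  induction xs generalizing m c with
  | nil => simp
  | cons x xs ih =>
    simp only [List.foldl_cons, maxStep]
    split
    · rw [ih x (c + 1), ih x (0 + 1)]; simp [Prod.ext_iff]; ring
    · exact ih m c

-- the combined sweep of A splits into the two independent sweeps of B, given l ≤ h
theorem combined_split (xs : List Int) (l h t : Int) (hlh : l ≤ h) :
    (xs.foldl (fun (s : Int × Int × Int) x =>
        if x < s.1 then (x, s.2.1, s.2.2 + 1)
        else if x > s.2.1 then (s.1, x, s.2.2 + 1)
        else s) (l, h, t)).2.2
    = t + (xs.foldl minStep (l, 0)).2 + (xs.foldl maxStep (h, 0)).2 := by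
  induction xs generalizing l h t with
  | nil => simp
  | cons x xs ih =>
    by_cases h1 : x < l
    · have h2 : ¬ x > h := by omega
      simp only [List.foldl_cons, minStep, maxStep, if_pos h1, if_neg h2]
      rw [ih x h (t + 1) (by omega), minStep_offset xs x (0 + 1)]
      ring
    · by_cases h2 : x > h
      · simp only [List.foldl_cons, minStep, maxStep, if_neg h1, if_pos h2]
        rw [ih l x (t + 1) (by omega), maxStep_offset xs x (0 + 1)]
        ring
      · simp only [List.foldl_cons, minStep, maxStep, if_neg h1, if_neg h2]
        exact ih l h t hlh

-- A's pyRange fold on a nonempty list, after peeling i = 0, is the combined sweep over the tail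
theorem coolness_cons (a : Int) (rest : List Int) :
    coolness (a :: rest)
    = (rest.foldl (fun (s : Int × Int × Int) x =>
        if x < s.1 then (x, s.2.1, s.2.2 + 1)
        else if x > s.2.1 then (s.1, x, s.2.2 + 1)
        else s) (a, a, 0)).2.2 := by
  unfold coolness
  have hlen : PySem.List.len (a :: rest) = (rest.length : Int) + 1 := by
    simp [PySem.List.len_eq]
  rw [hlen, PySem.List.pyRange_one_cons (by omega)]
  simp only [List.foldl_cons]
  have h0 : coolnessStepA (a :: rest) (0, 0, 0) 0 = (a, a, 0) := by
    simp [coolnessStepA, PySem.List.pyGetD_zero_cons]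
  rw [h0]
  have hcong : (PySem.List.pyRange (0 + 1) ((rest.length : Int) + 1) 1).foldl
      (coolnessStepA (a :: rest)) (a, a, 0)
      = (PySem.List.pyRange (0 + 1) ((rest.length : Int) + 1) 1).foldl
        (fun (s : Int × Int × Int) i =>
          let x := PySem.List.pyGetD (a :: rest) i 0
          if x < s.1 then (x, s.2.1, s.2.2 + 1)
          else if x > s.2.1 then (s.1, x, s.2.2 + 1)
          else s) (a, a, 0) := by
    apply PySem.List.foldl_congr_mem
    intro acc i hi
    have hmem := (PySem.List.mem_pyRange_one).mp hi
    have : ¬ (i == 0) = true := by simp; omega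
    simp [coolnessStepA, this]
  rw [hcong]
  have hdrop : PySem.List.pyRange (0 + 1) ((rest.length : Int) + 1) 1
      = PySem.List.pyRange 1 (PySem.List.len (a :: rest)) 1 := by
    rw [hlen]; norm_num
  rw [hdrop, PySem.List.foldl_pyRange_pyGetD (a := 1) (xs := a :: rest) (d := 0)
    (f := fun (s : Int × Int × Int) x =>
      if x < s.1 then (x, s.2.1, s.2.2 + 1)
      else if x > s.2.1 then (s.1, x, s.2.2 + 1)
      else s) (init := (a, a, 0)) (by omega)]
  simp

-- ===== VERDICT =====
theorem coolness_spec : Claim_equal_coolness := by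
  intro arr _
  unfold Spec_coolness
  match arr with
  | [] => simp [coolness, coolness_alt, PySem.List.len_eq]
  | a :: rest =>
    rw [coolness_cons, combined_split rest a a 0 le_rfl]
    simp only [coolness_alt]
    rw [maxStep_offset rest a (rest.foldl minStep (a, 0)).2]
    ring
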